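-- pv_equiv track=rewrite | github.com/KosGeny/ITMO_Optimization_Methods | LR-1/main.py | find_basic_columns
-- ===== SOURCE A (Python) =====
-- def find_basic_columns(A):
--     m = len(A)
--     n = len(A[0])
--     basic_cols = [-1]*m
--     for j in range(n):
--         col = [A[i][j] for i in range(m)]
--         ones = [i for i,v in enumerate(col) if v == 1]
--         if len(ones)==1 and all((v==0 or v==1) for v in col):
--             row_idx = ones[0]
--             if basic_cols[row_idx] == -1:
--                 basic_cols[row_idx] = j
--     return basic_cols
-- ===== SOURCE B (Python) =====
-- def _step(st, v, i):
--     valid, c, r = st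
--     if v == 1:
--         return (valid, c + 1, i)
--     return (valid and v == 0, c, r)
--
-- def find_basic_columns(A):
--     m = len(A)
--     n = len(A[0])
--     state = [(True, 0, 0)] * n  # per column: (valid, ones_count, last_one_row)
--     for i in range(m):
--         row = A[i]
--         state = [_step(st, row[j], i) for j, st in enumerate(state)]
--     basic = [-1] * m
--     for j in range(n):
--         valid, c, r = state[j]
--         if valid and c == 1 and basic[r] == -1:
--             basic[r] = j
--     return basic
-- ===== Notes on version B (the rewrite author's own statement) =====
-- stated objective: alternative
-- what changed: A scans column by column, materialising each column and re-scanning it for ones and validity; B does one row-major sweep maintaining per-column (valid, ones-count, last-one-row) accumulators, then a single assignment pass over columns.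
import Mathlib
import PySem

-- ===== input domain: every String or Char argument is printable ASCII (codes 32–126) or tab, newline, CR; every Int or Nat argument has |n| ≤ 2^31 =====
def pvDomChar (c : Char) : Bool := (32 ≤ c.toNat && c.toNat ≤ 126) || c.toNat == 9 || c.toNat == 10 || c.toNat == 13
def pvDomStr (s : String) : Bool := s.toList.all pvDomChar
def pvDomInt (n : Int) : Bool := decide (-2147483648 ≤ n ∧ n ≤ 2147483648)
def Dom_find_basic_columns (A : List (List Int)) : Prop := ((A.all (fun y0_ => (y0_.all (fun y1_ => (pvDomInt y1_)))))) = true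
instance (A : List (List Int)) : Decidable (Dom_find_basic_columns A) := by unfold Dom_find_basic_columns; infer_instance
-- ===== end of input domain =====

-- B replaces A's column-by-column scan (each column materialised and re-scanned) by one
-- row-major sweep maintaining per-column (valid, ones-count, last-one-row) accumulators,
-- followed by a single assignment pass over columns; objective: alternative decomposition.

-- ===== PORT A =====
-- indices i < m, j < n are nonnegative and (under Pre_) in range, so A[i][j] is ported as getD
def find_basic_columns (A : List (List Int)) : List Int :=
  let m := A.length
  let n := (A.headD []).length
  (List.range n).foldl (fun basic j =>
    let col := (List.range m).map (fun i => (A.getD i []).getD j 0)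
    let ones := ((PySem.List.enumerate col 0).filter (fun p => p.2 == 1)).map (fun p => p.1)
    if ones.length == 1 && col.all (fun v => v == 0 || v == 1) then
      let row_idx := ones.headD 0
      if PySem.List.pyGetD basic row_idx (-1) == -1 then
        PySem.List.pySetD basic row_idx (j : Int)
      else basic
    else basic) (List.replicate m (-1))

-- ===== PORT B =====
def stepB (st : Bool × Nat × Int) (v : Int) (i : Int) : Bool × Nat × Int :=
  if v == 1 then (st.1, st.2.1 + 1, i) else (st.1 && v == 0, st.2.1, st.2.2)

def find_basic_columns_alt (A : List (List Int)) : List Int :=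
  let m := A.length
  let n := (A.headD []).length
  let state := (List.range m).foldl (fun st i =>
      let row := A.getD i []
      (PySem.List.enumerate st 0).map (fun p => stepB p.2 (PySem.List.pyGetD row p.1 0) (i : Int)))
    (List.replicate n (true, 0, (0 : Int)))
  (List.range n).foldl (fun basic j =>
    let s := state.getD j (true, 0, 0)
    if s.1 && s.2.1 == 1 && PySem.List.pyGetD basic s.2.2 (-1) == -1 then
      PySem.List.pySetD basic s.2.2 (j : Int)
    else basic) (List.replicate m (-1))

-- ===== PRECONDITION & SPEC =====
-- Python A raises IndexError on an empty matrix (A[0]) and on ragged input whose later rows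
-- are shorter than the first row (A[i][j]); exactly those inputs are excluded.
def Pre_find_basic_columns (A : List (List Int)) : Prop :=
  A ≠ [] ∧ ∀ r ∈ A, (A.headD []).length ≤ r.length
instance (A : List (List Int)) : Decidable (Pre_find_basic_columns A) := by
  unfold Pre_find_basic_columns; infer_instance
def pvWitness_find_basic_columns : List (List Int) := [[1, 0, 3], [0, 1, 5]]

def Spec_find_basic_columns (A : List (List Int)) (out : List Int) : Prop := out = find_basic_columns_alt A
instance (A : List (List Int)) (out : List Int) : Decidable (Spec_find_basic_columns A out) := by unfold Spec_find_basic_columns; infer_instance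

-- ===== CLAIM (what is proved, stated in full; the proofs are below) =====
def Claim_equal_find_basic_columns : Prop := ∀ (A : List (List Int)), Dom_find_basic_columns A → Pre_find_basic_columns A → Spec_find_basic_columns A (find_basic_columns A)

-- ===== LEMMAS AND PROOFS =====

-- proof-side abbreviations
def pvEntry (A : List (List Int)) (i j : Nat) : Int := (A.getD i []).getD j 0

def pvColState (A : List (List Int)) (j k : Nat) : Bool × Nat × Int :=
  (List.range k).foldl (fun st i => stepB st (pvEntry A i j) (i : Int)) (true, 0, 0)

def pvCol (A : List (List Int)) (j k : Nat) : List Int :=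
  (List.range k).map (fun i => pvEntry A i j)

def pvOnes (col : List Int) : List Int :=
  ((PySem.List.enumerate col 0).filter (fun p => p.2 == 1)).map (fun p => p.1)

-- B's row sweep computes, per column j, the fold of stepB over that column
theorem pv_state_char (A : List (List Int)) (n k : Nat) :
    (List.range k).foldl (fun st i =>
        (PySem.List.enumerate st 0).map
          (fun p => stepB p.2 (PySem.List.pyGetD (A.getD i []) p.1 0) (i : Int)))
      (List.replicate n (true, 0, (0 : Int)))
    = (List.range n).map (fun j => pvColState A j k) := by
  induction k with
  | zero => simp [pvColState]
  | succ k ih =>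
      rw [List.range_succ, List.foldl_append, ih]
      simp only [List.foldl_cons, List.foldl_nil]
      apply List.ext_getElem
      · simp [PySem.List.length_enumerate]
      · intro t h1 h2
        simp only [List.getElem_map, PySem.List.getElem_enumerate, List.getElem_range] at *
        rw [show ((0 : Int) + (t : Int)) = ((t : Nat) : Int) by omega]
        rw [PySem.List.pyGetD_natCast]
        simp [pvColState, List.range_succ, pvEntry]

-- the per-column fold equals A's column statistics
theorem pv_col_char (A : List (List Int)) (j k : Nat) :
    pvColState A j k =
      ((pvCol A j k).all (fun v => v == 0 || v == 1),
       (pvOnes (pvCol A j k)).length,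
       (pvOnes (pvCol A j k)).getLastD 0) := by
  induction k with
  | zero => simp [pvColState, pvCol, pvOnes]
  | succ k ih =>
      have hcol : pvCol A j (k + 1) = pvCol A j k ++ [pvEntry A k j] := by
        simp [pvCol, List.range_succ]
      have hlen : (pvCol A j k).length = k := by simp [pvCol]
      have hones : pvOnes (pvCol A j (k + 1)) =
          pvOnes (pvCol A j k) ++ (if pvEntry A k j == 1 then [(k : Int)] else []) := by
        rw [pvOnes, hcol, PySem.List.enumerate_append, List.filter_append, List.map_append, hlen]
        by_cases hv : pvEntry A k j = 1 <;>
          simp [PySem.List.enumerate_cons, PySem.List.enumerate_nil, hv, pvOnes]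
      have hstate : pvColState A j (k + 1) = stepB (pvColState A j k) (pvEntry A k j) (k : Int) := by
        simp [pvColState, List.range_succ]
      rw [hstate, ih, hones, hcol]
      by_cases hv : pvEntry A k j = 1
      · simp [stepB, hv]
      · have h1 : (pvEntry A k j == 1) = false := by simp [hv]
        simp [stepB, h1]

theorem pv_headD_eq_getLastD (l : List Int) (h : l.length = 1) : l.headD 0 = l.getLastD 0 := by
  match l, h with
  | [x], _ => rfl

-- ===== VERDICT (by name: the statement is the Claim_ definition above) =====
theorem find_basic_columns_spec : Claim_equal_find_basic_columns := by
  intro A _ _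
  unfold Spec_find_basic_columns find_basic_columns find_basic_columns_alt
  dsimp only
  rw [pv_state_char]
  apply PySem.List.foldl_congr_mem
  intro basic j hj
  rw [List.mem_range] at hj
  rw [PySem.List.getD_map_range _ _ _ _ hj]
  rw [pv_col_char]
  rw [show (List.map (fun i => (A.getD i []).getD j 0) (List.range A.length)) = pvCol A j A.length from rfl]
  rw [show (List.map (fun p => p.1) (List.filter (fun p => p.2 == 1)
        (PySem.List.enumerate (pvCol A j A.length)))) = pvOnes (pvCol A j A.length) from rfl]
  dsimp only
  by_cases h1 : (pvOnes (pvCol A j A.length)).length = 1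
  · rw [pv_headD_eq_getLastD _ h1]
    by_cases h2 : ((pvCol A j A.length).all fun v => v == 0 || v == 1) = true
    · simp [h1, h2]
    · simp [h1, h2]
  · have hb : ((pvOnes (pvCol A j A.length)).length == 1) = false := by simp [h1]
    simp [hb]
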